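-- pv_equiv track=rewrite | github.com/potroy2007/Rosalind | LCSM/LCSM.py | common_substr
-- ===== SOURCE A (Python) =====
-- def common_substr(seq_0, seqs, start, length):
--     # Look at all possible substrings of a given 'length'
--     for i in range(len(seq_0) - length + 1):
--         substr = seq_0[i:i+length]
--
--         # as soon as we find a sequence that doesn't contain this substring move on to next substring
--         # otherwise return this substring
--         for seq in seqs:
--              if substr not in seq:
--                  break
--         else:
--             return (i, substr)
--     return (-1, "")
-- ===== SOURCE B (Python) =====
-- def common_substr(seq_0, seqs, start, length):
--     # Build the set of length-`length` windows shared by all sequences once,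
--     # then scan seq_0 left to right for the first window in that set.
--     common = None
--     for seq in seqs:
--         windows = {seq[j:j+length] for j in range(len(seq) - length + 1)}
--         common = windows if common is None else {w for w in common if w in windows}
--     for i in range(len(seq_0) - length + 1):
--         substr = seq_0[i:i+length]
--         if common is None or substr in common:
--             return (i, substr)
--     return (-1, "")
-- ===== Notes on version B (the rewrite author's own statement) =====
-- stated objective: alternative
-- what changed: A tests every candidate window of seq_0 by running a substring search inside every sequence; B instead precomputes the set of length-`length` windows shared by all sequences (per-sequence window sets intersected once) and then scans seq_0 for the first window in that set.
-- outside the precondition, e.g. on common_substr('abc', ['ab'], 0, -1): A returns (0, 'ab'), B returns (1, '')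
import Mathlib
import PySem

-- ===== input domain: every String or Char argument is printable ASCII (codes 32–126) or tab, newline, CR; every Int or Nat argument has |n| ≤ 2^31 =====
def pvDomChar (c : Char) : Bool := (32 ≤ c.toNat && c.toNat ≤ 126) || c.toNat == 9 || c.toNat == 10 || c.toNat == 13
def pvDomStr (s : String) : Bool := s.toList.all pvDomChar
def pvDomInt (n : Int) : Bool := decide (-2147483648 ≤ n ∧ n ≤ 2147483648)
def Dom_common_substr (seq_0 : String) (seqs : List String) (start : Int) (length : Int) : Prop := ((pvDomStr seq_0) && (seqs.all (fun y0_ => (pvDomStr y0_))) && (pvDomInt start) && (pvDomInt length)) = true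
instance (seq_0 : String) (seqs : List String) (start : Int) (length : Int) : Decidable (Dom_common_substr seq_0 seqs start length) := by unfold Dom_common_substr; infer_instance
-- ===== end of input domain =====

-- B replaces A's per-candidate substring searches by one precomputed set of windows
-- common to all sequences, then a single left-to-right scan of seq_0 (objective: alternative).

-- ===== PORT A =====
-- inner 'for seq in seqs: if substr not in seq: break / else: return' as a Bool:
-- true = the for-else fell through (every seq contains substr)
def pvAall (sub : List Char) : List String → Bool
  | [] => true
  | seq :: rest =>
    if PySem.Chars.isIn sub seq.toList = false then false else pvAall sub rest

-- outer 'for i in range(len(seq_0) - length + 1)' with its early return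
-- (a counter i counting up to the range's stop, one step per Python iteration)
def pvAloop (s0 : List Char) (seqs : List String) (length stop i : Int) : Int × String :=
  if i < stop then
    let substr := PySem.List.slice s0 (some i) (some (i + length))
    if pvAall substr seqs then (i, String.ofList substr)
    else pvAloop s0 seqs length stop (i + 1)
  else (-1, "")
termination_by (stop - i).toNat
decreasing_by omega

def common_substr (seq_0 : String) (seqs : List String) (start : Int) (length : Int) : Int × String :=
  pvAloop seq_0.toList seqs length (PySem.Str.len seq_0 - length + 1) 0

-- ===== PORT B =====
-- {seq[j:j+length] for j in range(len(seq) - length + 1)}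
def pvWindows (k : Int) (seq : String) : List (List Char) :=
  PySem.Set.ofList ((PySem.List.pyRange 0 (PySem.Str.len seq - k + 1) 1).map
    (fun j => PySem.List.slice seq.toList (some j) (some (j + k))))

-- 'common = None; for seq in seqs: windows = …; common = windows if common is None else {w for w in common if w in windows}'
def pvCommon (k : Int) (seqs : List String) : Option (List (List Char)) :=
  seqs.foldl (fun common seq =>
    let windows := pvWindows k seq
    match common with
    | none => some windows
    | some c => some (c.filter (fun w => decide (w ∈ windows)))) none

-- 'common is None or substr in common'
def pvMemAcc (sub : List Char) : Option (List (List Char)) → Bool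
  | none => true
  | some c => decide (sub ∈ c)

-- 'for i in range(len(seq_0) - length + 1): … if common is None or substr in common: return'
def pvBscan (s0 : List Char) (common : Option (List (List Char))) (length stop i : Int) :
    Int × String :=
  if i < stop then
    let substr := PySem.List.slice s0 (some i) (some (i + length))
    if pvMemAcc substr common then (i, String.ofList substr)
    else pvBscan s0 common length stop (i + 1)
  else (-1, "")
termination_by (stop - i).toNat
decreasing_by omega

def common_substr_alt (seq_0 : String) (seqs : List String) (start : Int) (length : Int) : Int × String :=
  pvBscan seq_0.toList (pvCommon length seqs) length (PySem.Str.len seq_0 - length + 1) 0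

-- ===== PRECONDITION & SPEC =====
-- Pre_ admits the task's natural domain length ≥ 0 (and a trivially empty seqs, where both
-- return the first candidate): a negative `length` with a nonempty seqs is excluded because
-- A's candidate "substrings" are then accidental overlapping tail slices seq_0[i:i+length]
-- (a quirk of Python's negative slice bounds), which B's per-sequence window sets do not
-- reproduce — and B's window loops run ~|length| iterations there, which does not terminate
-- in practice for the admissible |length| ≤ 2^31.
def Pre_common_substr (seq_0 : String) (seqs : List String) (start : Int) (length : Int) : Prop :=
  0 ≤ length ∨ seqs = []
instance (seq_0 : String) (seqs : List String) (start : Int) (length : Int) : Decidable (Pre_common_substr seq_0 seqs start length) := by unfold Pre_common_substr; infer_instance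

def pvWitness_common_substr : String × List String × Int × Int := ("GATTACA", ["TAGACCA", "ATACA"], 0, 2)

def Spec_common_substr (seq_0 : String) (seqs : List String) (start : Int) (length : Int) (out : Int × String) : Prop := out = common_substr_alt seq_0 seqs start length
instance (seq_0 : String) (seqs : List String) (start : Int) (length : Int) (out : Int × String) : Decidable (Spec_common_substr seq_0 seqs start length out) := by unfold Spec_common_substr; infer_instance

-- ===== CLAIM (what is proved, stated in full; the proofs are below) =====
def Claim_equal_common_substr : Prop := ∀ (seq_0 : String) (seqs : List String) (start : Int) (length : Int), Dom_common_substr seq_0 seqs start length → Pre_common_substr seq_0 seqs start length → Spec_common_substr seq_0 seqs start length (common_substr seq_0 seqs start length)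

-- ===== LEMMAS AND PROOFS =====

-- membership in one per-sequence window set = Python's 'sub in seq', for sub of the window length
lemma mem_pvWindows_iff (kN : Nat) (seq : String) (sub : List Char) (hlen : sub.length = kN) :
    sub ∈ pvWindows (kN : Int) seq ↔ PySem.Chars.isIn sub seq.toList = true := by
  rw [← PySem.Chars.exists_prefix_drop_iff_isIn]
  unfold pvWindows
  rw [PySem.Set.mem_ofList, List.mem_map]
  constructor
  · rintro ⟨j, hj, hje⟩
    rw [PySem.List.mem_pyRange_one] at hj
    obtain ⟨hj0, hjlt⟩ := hj
    lift j to Nat using hj0 with jN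
    refine ⟨jN, ?_⟩
    rw [← Int.natCast_add, PySem.List.slice_natCast, Nat.add_sub_cancel_left] at hje
    rw [← hje]
    exact List.take_prefix _ _
  · rintro ⟨j, hpre⟩
    have hl2 : PySem.Str.len seq = (seq.toList.length : Int) := by simp
    have hdlen := hpre.length_le
    rw [List.length_drop, hlen] at hdlen
    by_cases hj : j ≤ seq.toList.length
    · refine ⟨(j : Int), ?_, ?_⟩
      · rw [PySem.List.mem_pyRange_one, hl2]
        exact ⟨Int.natCast_nonneg j, by omega⟩
      · rw [← Int.natCast_add, PySem.List.slice_natCast, Nat.add_sub_cancel_left]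
        rw [List.prefix_iff_eq_take] at hpre
        rw [← hlen]
        exact hpre.symm
    · -- a prefix of drop j for j past the end forces sub = [] (so kN = 0): take j = 0
      have hk0 : kN = 0 := by omega
      have hsub : sub = [] := List.length_eq_zero_iff.mp (by omega)
      refine ⟨(0 : Int), ?_, ?_⟩
      · rw [PySem.List.mem_pyRange_one, hl2]
        exact ⟨le_refl _, by omega⟩
      · rw [zero_add, show ((0:Int)) = ((0:Nat):Int) from rfl, PySem.List.slice_natCast]
        simp [hk0, hsub]

-- membership through B's intersection fold = 'every processed seq contains sub'
lemma pvMemAcc_foldl (k : Int) (sub : List Char) :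
    ∀ (seqs : List String) (acc : Option (List (List Char))),
      pvMemAcc sub (seqs.foldl (fun common seq =>
        let windows := pvWindows k seq
        match common with
        | none => some windows
        | some c => some (c.filter (fun w => decide (w ∈ windows)))) acc)
      = (pvMemAcc sub acc && seqs.all (fun seq => decide (sub ∈ pvWindows k seq))) := by
  intro seqs
  induction seqs with
  | nil => intro acc; simp
  | cons s rest ih =>
    intro acc
    rw [List.foldl_cons, ih, List.all_cons]
    cases acc with
    | none => simp [pvMemAcc]
    | some c =>
      simp only [pvMemAcc, List.mem_filter]
      by_cases h1 : sub ∈ c <;> by_cases h2 : sub ∈ pvWindows k s <;>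
        simp [h1, h2]

-- A's inner for-else is List.all of 'sub in seq'
lemma pvAall_eq_all (sub : List Char) (seqs : List String) :
    pvAall sub seqs = seqs.all (fun seq => PySem.Chars.isIn sub seq.toList) := by
  induction seqs with
  | nil => rfl
  | cons s rest ih =>
    simp only [pvAall, List.all_cons, ih]
    cases h : PySem.Chars.isIn sub s.toList <;> simp

-- hence A's test and B's test agree on any window of the right length
lemma test_eq (kN : Nat) (seqs : List String) (sub : List Char) (hlen : sub.length = kN) :
    pvAall sub seqs = pvMemAcc sub (pvCommon (kN : Int) seqs) := by
  unfold pvCommon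
  rw [pvMemAcc_foldl, pvAall_eq_all]
  simp only [pvMemAcc, Bool.true_and]
  refine List.all_congr rfl (fun s => ?_)
  rw [← Bool.coe_iff_coe]
  simp only [decide_eq_true_eq]
  exact (mem_pvWindows_iff kN s sub hlen).symm

-- the two scans agree step by step while the counter stays inside the valid range
lemma loops_eq (s0 : List Char) (seqs : List String) (kN : Nat) (stop : Int)
    (hstop : stop ≤ (s0.length : Int) - kN + 1) :
    ∀ (n : Nat) (i : Int), 0 ≤ i → (stop - i).toNat = n →
      pvAloop s0 seqs (kN : Int) stop i = pvBscan s0 (pvCommon (kN : Int) seqs) (kN : Int) stop i := by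
  intro n
  induction n with
  | zero =>
    intro i hi hn
    rw [pvAloop, pvBscan]
    have h : ¬ i < stop := by omega
    simp [h]
  | succ m ih =>
    intro i hi hn
    rw [pvAloop, pvBscan]
    by_cases h : i < stop
    · have hlen : (PySem.List.slice s0 (some i) (some (i + (kN : Int)))).length = kN := by
        lift i to Nat using hi with iN
        rw [← Int.natCast_add, PySem.List.slice_natCast, Nat.add_sub_cancel_left]
        rw [List.length_take, List.length_drop]
        omega
      simp only [h, if_true]
      rw [test_eq kN seqs _ hlen, ih (i + 1) (by omega) (by omega)]
    · simp [h]

-- with no sequences both loops accept the very first candidate (or run out of candidates)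
lemma loops_eq_no_seqs (s0 : List Char) (k stop i : Int) :
    pvAloop s0 [] k stop i = pvBscan s0 (pvCommon k []) k stop i := by
  rw [pvAloop, pvBscan]
  by_cases h : i < stop
  · simp only [h, if_true]
    rfl
  · simp [h]

-- ===== VERDICT (by name: the statement is the Claim_ definition above) =====
theorem common_substr_spec : Claim_equal_common_substr := by
  intro seq_0 seqs start length _hdom hpre
  unfold Spec_common_substr common_substr common_substr_alt
  rcases hpre with h0 | hs
  · lift length to Nat using h0 with kN
    have hl2 : PySem.Str.len seq_0 = (seq_0.toList.length : Int) := by simp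
    rw [hl2]
    exact loops_eq seq_0.toList seqs kN _ (by omega)
      ((seq_0.toList.length : Int) - kN + 1 - 0).toNat 0 (le_refl 0) rfl
  · subst hs
    exact loops_eq_no_seqs seq_0.toList length _ 0
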